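-- pv_equiv track=rewrite | github.com/lanlan96/3DRM | OSeg-PointCNN-RN/utils/data_utils.py | get_room_pkl_dict
-- ===== SOURCE A (Python) =====
-- def get_room_pkl_dict(filelists):
--     room_ids = []
--     ROOM_PKL_DICT = {}
--     # Get all rooms
--     for file in filelists:
--         room_name = file.split('/')[3]
--         if room_name not in ROOM_PKL_DICT.keys():
--             ROOM_PKL_DICT[room_name]=[]
--             ROOM_PKL_DICT[room_name].append(file)
--         else:
--             ROOM_PKL_DICT[room_name].append(file)
--
--     return ROOM_PKL_DICT
-- ===== SOURCE B (Python) =====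
-- def get_room_pkl_dict(filelists):
--     rooms = list(dict.fromkeys(f.split('/')[3] for f in filelists))
--     return {room: [f for f in filelists if f.split('/')[3] == room]
--             for room in rooms}
-- ===== Notes on version B (the rewrite author's own statement) =====
-- stated objective: alternative
-- what changed: Replaces the single grouping loop that appends into a dict with a two-phase shape: first collect the distinct room names in first-appearance order via dict.fromkeys, then build each key's list by a separate filtering pass over the input.
import Mathlib
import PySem

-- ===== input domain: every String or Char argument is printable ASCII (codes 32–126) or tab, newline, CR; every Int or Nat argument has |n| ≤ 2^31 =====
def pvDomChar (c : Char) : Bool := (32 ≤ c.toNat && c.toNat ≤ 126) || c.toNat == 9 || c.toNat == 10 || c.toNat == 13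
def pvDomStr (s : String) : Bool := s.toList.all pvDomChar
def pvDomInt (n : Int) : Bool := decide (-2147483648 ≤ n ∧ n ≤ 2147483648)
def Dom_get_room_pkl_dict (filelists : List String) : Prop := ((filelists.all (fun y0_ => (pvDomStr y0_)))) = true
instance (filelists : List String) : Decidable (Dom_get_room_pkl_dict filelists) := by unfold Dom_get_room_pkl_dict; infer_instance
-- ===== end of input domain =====

-- B replaces the single grouping loop with a two-phase shape (collect distinct room
-- names first, then one filter pass per room); objective: alternative decomposition.

-- ===== PORT A =====
-- file.split('/')[3]; exact inside Pre_ (there the index is in range, so the .getD "" default is never taken)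
def pvRoom (file : String) : String :=
  (PySem.List.pyGet? ((PySem.Str.split? file "/").getD []) 3).getD ""

def get_room_pkl_dict (filelists : List String) : List (String × List String) :=
  (filelists.foldl
    (fun d file =>
      let room_name := pvRoom file
      if (PySem.Dict.keys d).contains room_name = false then
        -- ROOM_PKL_DICT[room_name]=[] ; ROOM_PKL_DICT[room_name].append(file)
        ((d.insert room_name ([] : List String)).modify room_name [] (fun v => v ++ [file]))
      else
        d.modify room_name [] (fun v => v ++ [file]))
    PySem.Dict.empty).items

-- ===== PORT B =====
def get_room_pkl_dict_alt (filelists : List String) : List (String × List String) :=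
  (PySem.List.dedup (filelists.map pvRoom)).map
    (fun room => (room, filelists.filter (fun f => pvRoom f == room)))

-- ===== PRECONDITION & SPEC =====
-- Pre_ excludes exactly the inputs where A raises IndexError: some path has fewer
-- than 4 '/'-separated parts, so file.split('/')[3] is out of range.
def Pre_get_room_pkl_dict (filelists : List String) : Prop :=
  ∀ f ∈ filelists, 4 ≤ ((PySem.Str.split? f "/").getD []).length
instance (filelists : List String) : Decidable (Pre_get_room_pkl_dict filelists) := by
  unfold Pre_get_room_pkl_dict; infer_instance

def pvWitness_get_room_pkl_dict : List String :=
  ["/a/b/room1/x.pkl", "/a/b/room2/y.pkl", "/a/b/room1/z.pkl"]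

def Spec_get_room_pkl_dict (filelists : List String) (out : List (String × List String)) : Prop :=
  out = get_room_pkl_dict_alt filelists
instance (filelists : List String) (out : List (String × List String)) :
    Decidable (Spec_get_room_pkl_dict filelists out) := by
  unfold Spec_get_room_pkl_dict; infer_instance

-- ===== CLAIM (what is proved, stated in full; the proofs are below) =====
def Claim_equal_get_room_pkl_dict : Prop :=
  ∀ (filelists : List String), Dom_get_room_pkl_dict filelists →
    Pre_get_room_pkl_dict filelists →
    Spec_get_room_pkl_dict filelists (get_room_pkl_dict filelists)

-- ===== LEMMAS AND PROOFS =====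

-- A's loop body, as a function
def pvStep (d : PySem.Dict String (List String)) (file : String) :
    PySem.Dict String (List String) :=
  if (PySem.Dict.keys d).contains (pvRoom file) = false then
    ((d.insert (pvRoom file) ([] : List String)).modify (pvRoom file) [] (fun v => v ++ [file]))
  else
    d.modify (pvRoom file) [] (fun v => v ++ [file])

theorem get_room_pkl_dict_eq_foldl (filelists : List String) :
    get_room_pkl_dict filelists = (filelists.foldl pvStep PySem.Dict.empty).items := rfl

theorem getD_pvStep (d : PySem.Dict String (List String)) (file : String) (r : String) :
    (pvStep d file).getD r [] =
      if r = pvRoom file then d.getD (pvRoom file) [] ++ [file] else d.getD r [] := by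
  unfold pvStep
  split_ifs with h hr hr
  · rw [PySem.Dict.getD_modify, if_pos hr, PySem.Dict.getD_insert_self,
      PySem.Dict.getD_of_not_contains _ _
        (by simpa [← PySem.Dict.contains_iff_mem_keys] using h)]
  · rw [PySem.Dict.getD_modify, if_neg hr, PySem.Dict.getD_insert_of_ne _ _ _ hr]
  · rw [PySem.Dict.getD_modify, if_pos hr]
  · rw [PySem.Dict.getD_modify, if_neg hr]

theorem keys_pvStep (d : PySem.Dict String (List String)) (file : String) :
    (pvStep d file).keys = PySem.Set.add d.keys (pvRoom file) := by
  unfold pvStep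
  split_ifs with h
  · have h' : d.contains (pvRoom file) = false := by
      simpa [← PySem.Dict.contains_iff_mem_keys] using h
    rw [PySem.Dict.keys_modify,
      PySem.Dict.keys_insert_of_contains _ _ (by simp [PySem.Dict.contains_insert_self]),
      PySem.Dict.keys_insert_of_not_contains _ _ h']
    simp only [PySem.Set.add, PySem.Set.contains]
    rw [if_neg (by simpa using h)]
  · have h' : d.contains (pvRoom file) = true := by
      simpa [← PySem.Dict.contains_iff_mem_keys] using h
    rw [PySem.Dict.keys_modify, PySem.Dict.keys_insert_of_contains _ _ h']
    simp only [PySem.Set.add, PySem.Set.contains]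
    rw [if_pos (by simpa using h)]

theorem getD_foldl_pvStep (l : List String) (d : PySem.Dict String (List String)) (r : String) :
    (l.foldl pvStep d).getD r [] = d.getD r [] ++ l.filter (fun f => pvRoom f == r) := by
  induction l generalizing d with
  | nil => simp
  | cons f t ih =>
    simp only [List.foldl_cons, List.filter_cons, ih, getD_pvStep]
    by_cases hr : pvRoom f = r
    · simp [hr]
    · simp [hr, Ne.symm hr]

theorem keys_foldl_pvStep (l : List String) (d : PySem.Dict String (List String)) :
    (l.foldl pvStep d).keys = PySem.Set.update d.keys (l.map pvRoom) := by
  induction l generalizing d with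
  | nil => simp [PySem.Set.update]
  | cons f t ih =>
    simp only [List.foldl_cons, List.map_cons, ih, keys_pvStep, PySem.Set.update,
      List.foldl_cons]

theorem update_empty_eq_ofList (xs : List String) :
    PySem.Set.update ([] : PySem.Set String) xs = PySem.Set.ofList xs := by
  rw [PySem.Set.ofList_eq_foldl]; rfl

theorem nodup_keys_foldl_pvStep (l : List String) :
    (l.foldl pvStep PySem.Dict.empty).keys.Nodup := by
  rw [keys_foldl_pvStep]
  simp only [PySem.Dict.keys_empty, update_empty_eq_ofList]
  exact PySem.Set.nodup_ofList (l.map pvRoom)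

-- ===== VERDICT (by name: the statement is the Claim_ definition above) =====
theorem get_room_pkl_dict_spec : Claim_equal_get_room_pkl_dict := by
  intro l _ _
  unfold Spec_get_room_pkl_dict get_room_pkl_dict_alt
  rw [get_room_pkl_dict_eq_foldl,
    PySem.Dict.items_eq_map_keys _ (nodup_keys_foldl_pvStep l) ([] : List String),
    keys_foldl_pvStep]
  simp only [PySem.Dict.keys_empty, update_empty_eq_ofList, PySem.List.dedup_eq_ofList]
  apply List.map_congr_left
  intro r _
  rw [getD_foldl_pvStep]
  simp
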